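-- pv_equiv track=rewrite | github.com/AP-MI-2021/lab-4-VladMicOprea | main.py | superprim
-- ===== SOURCE A (Python) =====
-- def is_prime(n):
--     '''
--     verifica daca numarul este prim
--     :param n: numar natural
--     :return: adevarat sau fals
--     '''
--     if n<2:
--         return False
--     else:
--         ok=True
--         for i in range(2, n//2 + 1):
--             if n%i == 0:
--                 ok=False
--     if ok:
--         return True
--     else:
--         return False
--
-- def superprim(list):
--     '''
--     functia afiseaza numerele din lista care sunt strict poztive si toate prefixele sale sunt prime
--     :param list:lista de numere intregi
--     :return:numerele din lista care sunt strict poztive si toate prefixele sale sunt prime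
--     '''
--     sir_superprim = []
--     for i in range(len(list)):
--         if list[i] > 0:
--             p = list[i]
--             ok = 1
--             while p > 0:
--                 if is_prime(p) == False:
--                     ok = 0
--                 p = p // 10
--             if ok == 1:
--                 sir_superprim.append(list[i])
--     return sir_superprim
-- ===== SOURCE B (Python) =====
-- def _is_prime(n):
--     if n < 2:
--         return False
--     d = 2
--     while d * d <= n:
--         if n % d == 0:
--             return False
--         d += 1
--     return True
--
--
-- def _right_truncatable_primes():
--     # breadth-first by digit count: start from the one-digit primes and repeatedly
--     # append a digit, keeping only prime extensions; 9 rounds cover all 32-bit ints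
--     # (the frontier is in fact empty after 8 digits, so later rounds are no-ops).
--     rtp = {2, 3, 5, 7}
--     level = [2, 3, 5, 7]
--     for _ in range(9):
--         level = [10 * x + d for x in level for d in range(10) if _is_prime(10 * x + d)]
--         rtp.update(level)
--     return rtp
--
-- _RTP = _right_truncatable_primes()
--
--
-- def superprim(list):
--     return [x for x in list if x in _RTP]
-- ===== Notes on version B (the rewrite author's own statement) =====
-- stated objective: faster
-- what changed: B precomputes once, by digit-level BFS from the one-digit primes 2,3,5,7 with a sqrt-bounded primality test, the (finite) set of right-truncatable primes, and then filters the list by set membership, instead of A's per-element loop that trial-divides every right-truncation of every element up to n//2.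
import Mathlib
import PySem

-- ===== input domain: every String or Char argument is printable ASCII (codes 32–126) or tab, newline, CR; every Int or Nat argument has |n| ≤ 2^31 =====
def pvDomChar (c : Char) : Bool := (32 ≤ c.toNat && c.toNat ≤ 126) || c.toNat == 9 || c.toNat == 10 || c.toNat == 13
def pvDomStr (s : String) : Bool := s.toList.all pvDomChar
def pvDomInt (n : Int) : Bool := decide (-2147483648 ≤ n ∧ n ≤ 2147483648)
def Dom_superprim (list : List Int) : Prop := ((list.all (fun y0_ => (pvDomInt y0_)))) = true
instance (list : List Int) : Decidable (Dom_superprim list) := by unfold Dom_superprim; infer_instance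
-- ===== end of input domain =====

-- B precomputes the (finite) set of right-truncatable primes by digit-level BFS and
-- filters the list by membership, instead of A's per-element repeated trial division.

-- termination fact both ports' digit loops cite
theorem pv_floordiv10_toNat_lt (p : Int) (hp : 0 < p) :
    (PySem.Int.floordiv p 10).toNat < p.toNat := by
  have h1 : PySem.Int.floordiv p 10 < p :=
    (PySem.Int.floordiv_lt_iff_lt_mul (by norm_num)).2 (by omega)
  have h0 : 0 ≤ PySem.Int.floordiv p 10 :=
    (PySem.Int.le_floordiv_iff_mul_le (q := 0) (by norm_num)).2 (by omega)
  omega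

-- ===== PORT A =====
def isPrimeA (n : Int) : Bool :=
  if n < 2 then false
  else
    (PySem.List.pyRange 2 (PySem.Int.floordiv n 2 + 1) 1).foldl
      (fun ok i => if PySem.Int.mod n i == 0 then false else ok) true

def loopA (p ok : Int) : Int :=
  if 0 < p then
    loopA (PySem.Int.floordiv p 10) (if isPrimeA p = false then 0 else ok)
  else ok
termination_by p.toNat
decreasing_by exact pv_floordiv10_toNat_lt _ (by omega)

def superprim (list : List Int) : List Int :=
  (PySem.List.pyRange 0 (list.length : Int) 1).foldl
    (fun sir i =>
      if 0 < PySem.List.pyGetD list i 0 then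
        if loopA (PySem.List.pyGetD list i 0) 1 == 1 then
          sir ++ [PySem.List.pyGetD list i 0]
        else sir
      else sir) []

-- ===== PORT B =====
def trialB (n d : Int) : Bool :=
  if d * d ≤ n then
    (if PySem.Int.mod n d == 0 then false else trialB n (d + 1))
  else true
termination_by (n + 1 - d).toNat
decreasing_by
  rename_i h _
  have h1 : 0 ≤ (d - 1) * (d - 1) := mul_self_nonneg (d - 1)
  have h2 : 0 ≤ d * d := mul_self_nonneg d
  have h3 : (d - 1) * (d - 1) = d * d - 2 * d + 1 := by ring
  omega

def isPrimeB (n : Int) : Bool :=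
  if n < 2 then false else trialB n 2

def extendB (level : List Int) : List Int :=
  level.flatMap fun x =>
    ((PySem.List.pyRange 0 10 1).filter fun d => isPrimeB (10 * x + d)).map
      fun d => 10 * x + d

def rtpB : PySem.Set Int :=
  ((PySem.List.pyRange 0 9 1).foldl
    (fun st _ => (PySem.Set.update st.1 (extendB st.2), extendB st.2))
    (PySem.Set.ofList [2, 3, 5, 7], [2, 3, 5, 7])).1

def superprim_alt (list : List Int) : List Int :=
  list.filter fun x => PySem.Set.contains rtpB x

-- ===== PRECONDITION & SPEC =====
def Spec_superprim (list : List Int) (out : List Int) : Prop := out = superprim_alt list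
instance (list : List Int) (out : List Int) : Decidable (Spec_superprim list out) := by unfold Spec_superprim; infer_instance

-- ===== CLAIM (what is proved, stated in full; the proofs are below) =====
def Claim_equal_superprim : Prop := ∀ (list : List Int), Dom_superprim list → Spec_superprim list (superprim list)

-- ===== LEMMAS AND PROOFS =====

-- the "every right-truncation is prime" chain, phrased with B's primality test
def chainB (x : Int) : Bool :=
  if 0 < x then isPrimeB x && chainB (PySem.Int.floordiv x 10) else true
termination_by x.toNat
decreasing_by exact pv_floordiv10_toNat_lt _ (by omega)

def goodB (x : Int) : Prop := 0 < x ∧ chainB x = true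

def stepB (st : PySem.Set Int × List Int) : PySem.Set Int × List Int :=
  (PySem.Set.update st.1 (extendB st.2), extendB st.2)

def initB : PySem.Set Int × List Int := (PySem.Set.ofList [2, 3, 5, 7], [2, 3, 5, 7])

theorem chainB_pos (x : Int) (hx : 0 < x) :
    chainB x = (isPrimeB x && chainB (PySem.Int.floordiv x 10)) := by
  rw [chainB]; simp [hx]

theorem chainB_nonpos (x : Int) (hx : ¬ 0 < x) : chainB x = true := by
  rw [chainB]; simp [hx]

theorem foldl_flag (n : Int) (l : List Int) (b : Bool) :
    l.foldl (fun ok i => if PySem.Int.mod n i == 0 then false else ok) b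
      = (b && l.all fun i => !(PySem.Int.mod n i == 0)) := by
  induction l generalizing b with
  | nil => simp
  | cons x xs ih =>
      rw [List.foldl_cons, ih]
      by_cases h : PySem.Int.mod n x == 0 <;> simp [h]

theorem divisor_small_iff_not_prime (m : Nat) (hm : 2 ≤ m) :
    Nat.Prime m ↔ ∀ j : Nat, 2 ≤ j → j ≤ m / 2 → ¬ j ∣ m := by
  constructor
  · intro hp j hj2 hjm hdvd
    have hlt : m / 2 < m := Nat.div_lt_self (by omega) (by omega)
    rcases (Nat.Prime.eq_one_or_self_of_dvd hp j hdvd) with h | h <;> omega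
  · intro h
    by_contra hnp
    set p := m.minFac with hpdef
    have hpp : p.Prime := Nat.minFac_prime (by omega)
    have hpd : p ∣ m := Nat.minFac_dvd m
    have hsq : p ^ 2 ≤ m := Nat.minFac_sq_le_self (by omega) hnp
    have h2p : 2 ≤ p := hpp.two_le
    have : p ≤ m / 2 := by
      rw [Nat.le_div_iff_mul_le (by norm_num)]
      have hpe : p * 2 ≤ p * p := Nat.mul_le_mul_left p h2p
      have hsq' : p * p ≤ m := by rw [pow_two] at hsq; exact hsq
      omega
    exact h p h2p this hpd

theorem divisor_sqrt_iff_prime (m : Nat) (hm : 2 ≤ m) :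
    Nat.Prime m ↔ ∀ j : Nat, 2 ≤ j → j * j ≤ m → ¬ j ∣ m := by
  constructor
  · intro hp j hj2 hjm hdvd
    rcases (Nat.Prime.eq_one_or_self_of_dvd hp j hdvd) with h | h
    · omega
    · rw [h] at hjm
      have h2m : 2 * m ≤ m * m := Nat.mul_le_mul_right m hm
      omega
  · intro h
    by_contra hnp
    set p := m.minFac with hpdef
    have hpp : p.Prime := Nat.minFac_prime (by omega)
    have hpd : p ∣ m := Nat.minFac_dvd m
    have hsq : p ^ 2 ≤ m := Nat.minFac_sq_le_self (by omega) hnp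
    refine h p hpp.two_le ?_ hpd
    rw [pow_two] at hsq
    exact hsq

theorem isPrimeA_eq_prime (n : Int) :
    isPrimeA n = decide (2 ≤ n ∧ Nat.Prime n.toNat) := by
  unfold isPrimeA
  by_cases h2 : n < 2
  · rw [if_pos h2]
    symm
    simp only [decide_eq_false_iff_not, not_and]
    intro h; omega
  · rw [if_neg h2, foldl_flag, Bool.eq_iff_iff]
    simp only [Bool.true_and, List.all_eq_true, PySem.List.mem_pyRange_one,
      Bool.not_eq_eq_eq_not, Bool.not_true, beq_eq_false_iff_ne, ne_eq,
      decide_eq_true_eq]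
    have hn2 : 2 ≤ n := by omega
    have hfd : PySem.Int.floordiv n 2 = ((n.toNat / 2 : Nat) : Int) := by
      have : n = ((n.toNat : Nat) : Int) := by omega
      rw [this]
      exact_mod_cast PySem.Int.floordiv_natCast n.toNat 2
    constructor
    · intro h
      refine ⟨hn2, (divisor_small_iff_not_prime n.toNat (by omega)).2 ?_⟩
      intro j hj2 hjm hdvd
      refine h (j : Int) ⟨by exact_mod_cast hj2, ?_⟩ ?_
      · rw [hfd]; push_cast; omega
      · rw [PySem.Int.mod_eq_zero_iff_dvd]
        have : n = ((n.toNat : Nat) : Int) := by omega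
        rw [this]; exact_mod_cast hdvd
    · rintro ⟨-, hp⟩ i ⟨hi2, hile⟩ hmod
      rw [PySem.Int.mod_eq_zero_iff_dvd] at hmod
      have hj := (divisor_small_iff_not_prime n.toNat (by omega)).1 hp i.toNat
        (by omega) (by rw [hfd] at hile; omega)
      apply hj
      have hin : (i.toNat : Int) = i := Int.toNat_of_nonneg (by omega)
      have hnn : ((n.toNat : Nat) : Int) = n := by omega
      rw [← Int.natCast_dvd_natCast, hin, hnn]
      exact hmod

theorem trialB_iff_aux (k : Nat) : ∀ (n d : Int), (n + 1 - d).toNat ≤ k → 2 ≤ d →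
    (trialB n d = true ↔ ∀ e : Int, d ≤ e → e * e ≤ n → ¬ e ∣ n) := by
  induction k with
  | zero =>
      intro n d hk hd
      have hnd : n < d := by omega
      have h2d : 2 * d ≤ d * d := mul_le_mul_of_nonneg_right hd (by omega)
      have hcond : ¬ d * d ≤ n := by omega
      rw [trialB, if_neg hcond]
      simp only [true_iff]
      intro e he hee
      exfalso
      have hde : d * d ≤ e * e := mul_le_mul he he (by omega) (by omega)
      omega
  | succ k ih =>
      intro n d hk hd
      rw [trialB]
      by_cases hcond : d * d ≤ n
      · rw [if_pos hcond]
        by_cases hmod : PySem.Int.mod n d == 0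
        · rw [if_pos hmod]
          simp only [Bool.false_eq_true, false_iff]
          push Not
          exact ⟨d, le_refl d, hcond, (PySem.Int.mod_eq_zero_iff_dvd n d).1 (by simpa using hmod)⟩
        · rw [if_neg hmod]
          have h2d : 2 * d ≤ d * d := mul_le_mul_of_nonneg_right hd (by omega)
          have hdn : d ≤ n := by omega
          rw [ih n (d + 1) (by omega) (by omega)]
          have hndvd : ¬ d ∣ n := by
            rw [← PySem.Int.mod_eq_zero_iff_dvd]
            simpa using hmod
          constructor
          · intro h e he hee hdvd
            rcases eq_or_lt_of_le he with rfl | hlt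
            · exact hndvd hdvd
            · exact h e (by omega) hee hdvd
          · intro h e he hee
            exact h e (by omega) hee
      · rw [if_neg hcond]
        simp only [true_iff]
        intro e he hee
        exfalso
        have hde : d * d ≤ e * e := mul_le_mul he he (by omega) (by omega)
        omega

theorem trialB_iff (n d : Int) (hd : 2 ≤ d) :
    trialB n d = true ↔ ∀ e : Int, d ≤ e → e * e ≤ n → ¬ e ∣ n :=
  trialB_iff_aux (n + 1 - d).toNat n d (le_refl _) hd

theorem isPrimeB_eq_prime (n : Int) :
    isPrimeB n = decide (2 ≤ n ∧ Nat.Prime n.toNat) := by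
  unfold isPrimeB
  by_cases h2 : n < 2
  · rw [if_pos h2]
    symm
    simp only [decide_eq_false_iff_not, not_and]
    intro h; omega
  · rw [if_neg h2, Bool.eq_iff_iff, trialB_iff n 2 (le_refl 2)]
    simp only [decide_eq_true_eq]
    have hn2 : 2 ≤ n := by omega
    constructor
    · intro h
      refine ⟨hn2, (divisor_sqrt_iff_prime n.toNat (by omega)).2 ?_⟩
      intro j hj2 hjm hdvd
      refine h (j : Int) (by exact_mod_cast hj2) (by omega) ?_
      have : n = ((n.toNat : Nat) : Int) := by omega
      rw [this]; exact_mod_cast hdvd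
    · rintro ⟨-, hp⟩ e he hee hdvd
      have hj := (divisor_sqrt_iff_prime n.toNat (by omega)).1 hp e.toNat
        (by omega)
        (by
          have hin : (e.toNat : Int) = e := Int.toNat_of_nonneg (by omega)
          have hnn : ((n.toNat : Nat) : Int) = n := by omega
          have hle : (e.toNat : Int) * (e.toNat : Int) ≤ ((n.toNat : Nat) : Int) := by
            rw [hin, hnn]; exact hee
          exact_mod_cast hle)
      apply hj
      have hin : (e.toNat : Int) = e := Int.toNat_of_nonneg (by omega)
      have hnn : ((n.toNat : Nat) : Int) = n := by omega
      rw [← Int.natCast_dvd_natCast, hin, hnn]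
      exact hdvd

theorem isPrimeA_eq_isPrimeB (n : Int) : isPrimeA n = isPrimeB n := by
  rw [isPrimeA_eq_prime, isPrimeB_eq_prime]

theorem loopA_eq_aux (k : Nat) : ∀ (p ok : Int), p.toNat ≤ k →
    loopA p ok = if chainB p = true then ok else 0 := by
  induction k with
  | zero =>
      intro p ok hk
      have hp : ¬ 0 < p := by omega
      rw [loopA, if_neg hp, chainB_nonpos p hp, if_pos rfl]
  | succ k ih =>
      intro p ok hk
      by_cases hp : 0 < p
      · rw [loopA, if_pos hp,
          ih _ _ (by have := pv_floordiv10_toNat_lt p hp; omega),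
          chainB_pos p hp, isPrimeA_eq_isPrimeB]
        by_cases h1 : isPrimeB p = true <;>
          by_cases h2 : chainB (PySem.Int.floordiv p 10) = true <;>
            simp [h1]
      · rw [loopA, if_neg hp, chainB_nonpos p hp, if_pos rfl]

theorem loopA_eq (p ok : Int) : loopA p ok = if chainB p = true then ok else 0 :=
  loopA_eq_aux p.toNat p ok (le_refl _)

theorem mem_extendB (lvl : List Int) (y : Int) :
    y ∈ extendB lvl ↔
      ∃ x ∈ lvl, ∃ d : Int, 0 ≤ d ∧ d < 10 ∧ y = 10 * x + d ∧ isPrimeB y = true := by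
  simp only [extendB, List.mem_flatMap, List.mem_map, List.mem_filter,
    PySem.List.mem_pyRange_one]
  constructor
  · rintro ⟨x, hx, d, ⟨⟨hd0, hd10⟩, hprime⟩, rfl⟩
    exact ⟨x, hx, d, hd0, hd10, rfl, hprime⟩
  · rintro ⟨x, hx, d, hd0, hd10, rfl, hprime⟩
    exact ⟨x, hx, d, ⟨⟨hd0, hd10⟩, hprime⟩, rfl⟩

theorem foldl_iterate {α β : Type} (f : α → α) (l : List β) (init : α) :
    l.foldl (fun s _ => f s) init = f^[l.length] init := by
  induction l generalizing init with
  | nil => simp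
  | cons x xs ih => simpa [Function.iterate_succ_apply] using ih (f init)

theorem rtpB_eq : rtpB = (stepB^[9] initB).1 := by
  show (List.foldl (fun st _ => stepB st) initB (PySem.List.pyRange 0 9 1)).1
      = (stepB^[9] initB).1
  rw [foldl_iterate, PySem.List.length_pyRange_one]
  have h9 : (9 - 0 : Int).toNat = 9 := by decide
  rw [h9]

theorem goodB_digit (x : Int) (h2 : 2 ≤ x) (h10 : x < 10) (hp : Nat.Prime x.toNat) :
    goodB x := by
  refine ⟨by omega, ?_⟩
  have hq : PySem.Int.floordiv x 10 = 0 :=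
    (PySem.Int.floordiv_eq_iff_of_pos (by norm_num)).2 ⟨by omega, by omega⟩
  rw [chainB_pos x (by omega), hq, chainB_nonpos 0 (by omega), isPrimeB_eq_prime]
  simp [h2, hp]

theorem invariantB (n : Nat) :
    (∀ x ∈ (stepB^[n] initB).1, goodB x) ∧
    (∀ x ∈ (stepB^[n] initB).2, goodB x) ∧
    (∀ x : Int, goodB x → x < 10 ^ (n + 1) → x ∈ (stepB^[n] initB).1) ∧
    (∀ x : Int, goodB x → 10 ^ n ≤ x → x < 10 ^ (n + 1) → x ∈ (stepB^[n] initB).2) := by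
  induction n with
  | zero =>
      simp only [Function.iterate_zero, id_eq, initB]
      have hgood : ∀ x ∈ ([2, 3, 5, 7] : List Int), goodB x := by
        intro x hx
        fin_cases hx
        · exact goodB_digit 2 (by norm_num) (by norm_num) (by decide)
        · exact goodB_digit 3 (by norm_num) (by norm_num) (by decide)
        · exact goodB_digit 5 (by norm_num) (by norm_num) (by decide)
        · exact goodB_digit 7 (by norm_num) (by norm_num) (by decide)
      have hsmall : ∀ x : Int, goodB x → x < 10 → x ∈ ([2, 3, 5, 7] : List Int) := by
        intro x hx h10
        obtain ⟨hx0, hchain⟩ := hx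
        rw [chainB_pos x hx0] at hchain
        simp only [Bool.and_eq_true] at hchain
        obtain ⟨hpx, -⟩ := hchain
        rw [isPrimeB_eq_prime] at hpx
        simp only [decide_eq_true_eq] at hpx
        obtain ⟨h2x, hp⟩ := hpx
        obtain ⟨m, rfl⟩ : ∃ m : Nat, x = (m : Int) := ⟨x.toNat, by omega⟩
        simp only [Int.toNat_natCast] at hp
        have h2n : 2 ≤ m := by exact_mod_cast h2x
        have h10n : m < 10 := by exact_mod_cast h10
        interval_cases m <;> first
          | exact absurd hp (by decide)
          | norm_num
      refine ⟨?_, hgood, ?_, ?_⟩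
      · intro x hx
        exact hgood x ((PySem.Set.mem_ofList _ _).1 hx)
      · intro x hx hlt
        rw [pow_one] at hlt
        exact (PySem.Set.mem_ofList _ _).2 (hsmall x hx hlt)
      · intro x hx h1 hlt
        rw [pow_one] at hlt
        exact hsmall x hx hlt
  | succ n ih =>
      obtain ⟨hs, hl, hcs, hcl⟩ := ih
      rw [Function.iterate_succ_apply']
      have hpow1 : (1 : Int) ≤ 10 ^ n := one_le_pow₀ (by norm_num)
      have hps : (10 : Int) ^ (n + 1) = 10 ^ n * 10 := pow_succ 10 n
      have hps2 : (10 : Int) ^ (n + 1 + 1) = 10 ^ (n + 1) * 10 := pow_succ 10 (n + 1)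
      simp only [stepB]
      have hlv : ∀ y ∈ extendB (stepB^[n] initB).2, goodB y := by
        intro y hy
        obtain ⟨x, hx, d, hd0, hd10, rfl, hprime⟩ :=
          (mem_extendB (stepB^[n] initB).2 y).1 hy
        obtain ⟨hx0, hchain⟩ := hl x hx
        have hy0 : (0 : Int) < 10 * x + d := by omega
        refine ⟨hy0, ?_⟩
        have hq : PySem.Int.floordiv (10 * x + d) 10 = x :=
          (PySem.Int.floordiv_eq_iff_of_pos (by norm_num)).2 ⟨by omega, by omega⟩
        rw [chainB_pos _ hy0, hq, hprime, hchain]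
        rfl
      have hlvc : ∀ x : Int, goodB x → 10 ^ (n + 1) ≤ x → x < 10 ^ (n + 1 + 1) →
          x ∈ extendB (stepB^[n] initB).2 := by
        intro x hx hge hlt
        obtain ⟨hx0, hchain⟩ := hx
        have ha1 : 10 ^ n ≤ PySem.Int.floordiv x 10 :=
          (PySem.Int.le_floordiv_iff_mul_le (by norm_num)).2 (by rw [← hps]; exact hge)
        have ha2 : PySem.Int.floordiv x 10 < 10 ^ (n + 1) :=
          (PySem.Int.floordiv_lt_iff_lt_mul (by norm_num)).2 (by rw [← hps2]; exact hlt)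
        have hd0 : 0 ≤ PySem.Int.mod x 10 := PySem.Int.mod_nonneg x (by norm_num)
        have hd10 : PySem.Int.mod x 10 < 10 := PySem.Int.mod_lt x (by norm_num)
        have hxad : PySem.Int.floordiv x 10 * 10 + PySem.Int.mod x 10 = x :=
          PySem.Int.floordiv_mul_add_mod x 10
        rw [chainB_pos x hx0] at hchain
        simp only [Bool.and_eq_true] at hchain
        obtain ⟨hpx, hca⟩ := hchain
        have hga : goodB (PySem.Int.floordiv x 10) := ⟨by linarith, hca⟩
        have hmem : PySem.Int.floordiv x 10 ∈ (stepB^[n] initB).2 :=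
          hcl _ hga ha1 ha2
        exact (mem_extendB _ x).2
          ⟨PySem.Int.floordiv x 10, hmem, PySem.Int.mod x 10, hd0, hd10, by omega, hpx⟩
      have hsc : ∀ x : Int, goodB x → x < 10 ^ (n + 1 + 1) →
          x ∈ PySem.Set.update (stepB^[n] initB).1 (extendB (stepB^[n] initB).2) := by
        intro x hx hlt
        apply (PySem.Set.mem_update _ _ x).2
        by_cases hsm : x < 10 ^ (n + 1)
        · exact Or.inl (hcs x hx hsm)
        · exact Or.inr (hlvc x hx (not_lt.mp hsm) hlt)
      refine ⟨?_, hlv, hsc, hlvc⟩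
      intro x hx
      rcases (PySem.Set.mem_update _ _ x).1 hx with h | h
      · exact hs x h
      · exact hlv x h

theorem pointwise (x : Int) (hx : x ≤ 2147483648) :
    (decide (0 < x) && (loopA x 1 == 1)) = PySem.Set.contains rtpB x := by
  have hloop : (loopA x 1 == 1) = chainB x := by
    rw [loopA_eq]
    by_cases h : chainB x = true <;> simp [h]
  rw [Bool.eq_iff_iff, hloop]
  simp only [Bool.and_eq_true, decide_eq_true_eq, PySem.Set.contains_iff, rtpB_eq]
  constructor
  · rintro ⟨h0, hc⟩
    refine (invariantB 9).2.2.1 x ⟨h0, hc⟩ ?_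
    have h10 : (10 : Int) ^ (9 + 1) = 10000000000 := by norm_num
    omega
  · intro hmem
    obtain ⟨h0, hc⟩ := (invariantB 9).1 x hmem
    exact ⟨h0, hc⟩

-- ===== VERDICT (by name: the statement is the Claim_ definition above) =====
theorem superprim_spec : Claim_equal_superprim := by
  intro list hdom
  unfold Spec_superprim superprim superprim_alt
  rw [PySem.List.foldl_pyRange_zero_pyGetD' list 0
    (fun sir x => if 0 < x then (if loopA x 1 == 1 then sir ++ [x] else sir) else sir) []]
  have hfun : (fun (sir : List Int) (x : Int) =>
      if 0 < x then (if loopA x 1 == 1 then sir ++ [x] else sir) else sir)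
      = fun sir x => if (decide (0 < x) && (loopA x 1 == 1)) then sir ++ [x] else sir := by
    funext sir x
    by_cases h1 : 0 < x <;> by_cases h2 : loopA x 1 == 1 <;> simp [h1, h2]
  rw [hfun, PySem.List.foldl_append_if (fun x => decide (0 < x) && (loopA x 1 == 1)) (fun x => x) list []]
  simp only [List.map_id', List.nil_append]
  apply List.filter_congr
  intro x hxmem
  have hd : pvDomInt x = true := by
    unfold Dom_superprim at hdom
    simp only [List.all_eq_true] at hdom
    exact hdom x hxmem
  have hb : x ≤ 2147483648 := by
    simp only [pvDomInt, decide_eq_true_eq] at hd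
    exact hd.2
  exact pointwise x hb
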